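-- pv_equiv track=rewrite | github.com/ccctw-ma/leetcode | src/Medium/HashTableTest/canReorderDoubled.py | canReorderDoubled2
-- ===== SOURCE A (Python) =====
-- from collections import Counter
-- from typing import List
--
-- def canReorderDoubled2(arr: List[int]) -> bool:
--     cnt = Counter(arr)
--     if cnt[0] % 2:
--         return False
--     for x in sorted(cnt, key=abs):
--         if cnt[2 * x] < cnt[x]:  # 无法找到足够的 2x 与 x 配对
--             return False
--         cnt[2 * x] -= cnt[x]
--     return True
-- ===== SOURCE B (Python) =====
-- from collections import Counter
-- from typing import List
--
-- def canReorderDoubled2(arr: List[int]) -> bool: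
--     waiting = Counter()
--     for x in sorted(arr, key=lambda v: (abs(v), v)):
--         if waiting[x] > 0:
--             waiting[x] -= 1      # x satisfies an earlier element expecting its double
--         else:
--             waiting[2 * x] += 1  # x now expects a 2*x later
--     return all(v == 0 for v in waiting.values())
-- ===== Notes on version B (the rewrite author's own statement) =====
-- stated objective: alternative
-- what changed: Replaces A's count-grouped greedy over distinct keys (Counter, early return, explicit odd-zero special case) by an element-wise pass over the abs-sorted array maintaining a 'pending doubles' multiset, with a final all-zero check and no special case for zero.
import Mathlib
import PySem

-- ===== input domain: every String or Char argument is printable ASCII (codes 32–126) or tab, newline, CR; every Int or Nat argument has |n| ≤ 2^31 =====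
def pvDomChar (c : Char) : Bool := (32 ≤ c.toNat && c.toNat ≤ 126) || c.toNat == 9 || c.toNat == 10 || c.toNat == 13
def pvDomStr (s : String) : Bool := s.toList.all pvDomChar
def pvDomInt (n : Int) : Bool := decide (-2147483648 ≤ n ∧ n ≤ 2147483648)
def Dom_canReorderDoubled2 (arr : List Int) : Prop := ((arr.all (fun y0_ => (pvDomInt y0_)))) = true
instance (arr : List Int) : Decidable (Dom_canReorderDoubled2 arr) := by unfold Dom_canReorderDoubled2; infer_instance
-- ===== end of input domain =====

-- B replaces A's count-grouped greedy over distinct keys (with an explicit odd-zero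
-- special case and early return) by an element-wise pass over the abs-sorted array
-- maintaining a "pending doubles" counter, checked all-zero at the end (objective: alternative).

-- ===== PORT A =====
def canReorderDoubled2 (arr : List Int) : Bool :=
  let cnt := PySem.Dict.counter arr
  if PySem.Int.mod (cnt.getD 0 0) 2 ≠ 0 then false
  else
    !((PySem.List.sorted cnt.keys (fun x => |x|) false).foldl
        (fun s x =>
          if s.1 then s
          else if s.2.getD (2 * x) 0 < s.2.getD x 0 then (true, s.2)
          else (false, s.2.modify (2 * x) 0 (fun t => t - s.2.getD x 0)))
        (false, cnt)).1

-- ===== PORT B =====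
def canReorderDoubled2_alt (arr : List Int) : Bool :=
  let w := (PySem.List.sorted2 arr (fun v => |v|) (fun v => v) false).foldl
      (fun w x => if w.getD x 0 > 0 then w.modify x 0 (fun t => t - 1)
                  else w.modify (2 * x) 0 (fun t => t + 1))
      (PySem.Dict.empty : PySem.Dict Int Int)
  w.values.all (fun v => v == 0)

-- ===== PRECONDITION & SPEC =====
def Spec_canReorderDoubled2 (arr : List Int) (out : Bool) : Prop := out = canReorderDoubled2_alt arr
instance (arr : List Int) (out : Bool) : Decidable (Spec_canReorderDoubled2 arr out) := by unfold Spec_canReorderDoubled2; infer_instance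

-- ===== CLAIM (what is proved, stated in full; the proofs are below) =====
def Claim_equal_canReorderDoubled2 : Prop := ∀ (arr : List Int), Dom_canReorderDoubled2 arr → Spec_canReorderDoubled2 arr (canReorderDoubled2 arr)

-- ===== LEMMAS AND PROOFS =====

-- the lexicographic sort key (abs v, v) of B's sort
def keyL (v : Int) : Lex (Int × Int) := toLex (|v|, v)

-- A's chain value: the value cnt[x] holds when A's loop reaches key x
def pendA (arr : List Int) (x : Int) : Int :=
  if h : x ≠ 0 ∧ (2:Int) ∣ x ∧ arr.count (x / 2) ≠ 0 then
    (arr.count x : Int) - pendA arr (x / 2)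
  else (arr.count x : Int)
termination_by x.natAbs
decreasing_by obtain ⟨h1, h2, _⟩ := h; omega

-- B's chain value: the number of pending doubles pushed from x's block onto 2*x
def boutB (arr : List Int) (x : Int) : Int :=
  if h : x ≠ 0 ∧ (2:Int) ∣ x ∧ arr.count (x / 2) ≠ 0 then
    max 0 ((arr.count x : Int) - boutB arr (x / 2))
  else max 0 ((arr.count x : Int))
termination_by x.natAbs
decreasing_by obtain ⟨h1, h2, _⟩ := h; omega

-- pending arriving at x from its half's block
def binB (arr : List Int) (x : Int) : Int :=
  if x ≠ 0 ∧ (2:Int) ∣ x ∧ arr.count (x / 2) ≠ 0 then boutB arr (x / 2) else 0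

-- the common characterisation of both programs
def Acond (arr : List Int) : Prop :=
  ((arr.count 0 : Int)) % 2 = 0 ∧ ∀ x ∈ arr, pendA arr x ≤ (arr.count (2 * x) : Int)

-- full functional description of B's waiting dict after the blocks of the keys in P
def wdesc (arr : List Int) (P : List Int) (y : Int) : Int :=
  if y ∈ P then
    (if y = 0 then (arr.count 0 : Int) % 2 else max 0 (binB arr y - (arr.count y : Int)))
  else if y ≠ 0 ∧ (2:Int) ∣ y ∧ y / 2 ∈ P then boutB arr (y / 2)
  else 0

-- B's distinct keys in B's processing order
def KbL (arr : List Int) : List Int := PySem.List.sorted (PySem.Set.ofList arr) keyL false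

lemma keyL_lt_iff (a b : Int) : keyL a < keyL b ↔ (|a| < |b| ∨ (|a| = |b| ∧ a < b)) := by
  simp [keyL, Prod.Lex.lt_iff]

lemma keyL_injective : Function.Injective keyL := by
  intro a b h
  have := congrArg (fun p : Lex (Int × Int) => (ofLex p).2) h
  simpa [keyL] using this

lemma KbL_nodup (arr : List Int) : (KbL arr).Nodup :=
  ((PySem.List.sorted_perm _ _ _).nodup_iff).mpr (PySem.Set.nodup_ofList arr)

lemma KbL_mem (arr : List Int) (z : Int) : z ∈ KbL arr ↔ arr.count z ≠ 0 := by
  rw [KbL, PySem.List.mem_sorted, PySem.Set.mem_ofList]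
  simp [List.count_pos_iff.symm, Nat.pos_iff_ne_zero]

lemma KbL_pairwise (arr : List Int) : (KbL arr).Pairwise (fun a b => keyL a < keyL b) := by
  have hle := PySem.List.sorted_pairwise (PySem.Set.ofList arr) keyL
  have hnd : (KbL arr).Pairwise (· ≠ ·) := KbL_nodup arr
  exact (hle.and hnd).imp (fun h => lt_of_le_of_ne h.1 (fun he => h.2 (keyL_injective he)))

lemma pendA_eq (arr : List Int) (x : Int) :
    pendA arr x = (arr.count x : Int) -
      (if x ≠ 0 ∧ (2:Int) ∣ x ∧ arr.count (x / 2) ≠ 0 then pendA arr (x / 2) else 0) := by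
  rw [pendA]
  split_ifs with h
  · rfl
  · ring

lemma boutB_nonneg (arr : List Int) (x : Int) : 0 ≤ boutB arr x := by
  rw [boutB]; split <;> simp

lemma boutB_eq (arr : List Int) (x : Int) :
    boutB arr x = max 0 ((arr.count x : Int) - binB arr x) := by
  rw [boutB, binB]
  split_ifs with h
  · rfl
  · simp

lemma A_flag_absorb (R : List Int) (d : PySem.Dict Int Int) :
    (R.foldl
      (fun s x =>
        if s.1 then s
        else if s.2.getD (2 * x) 0 < s.2.getD x 0 then (true, s.2)
        else (false, s.2.modify (2 * x) 0 (fun t => t - s.2.getD x 0)))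
      (true, d)) = (true, d) := by
  induction R with
  | nil => rfl
  | cons x R ih => simpa using ih

lemma A_loop (arr : List Int) (P R : List Int)
    (hnd : (P ++ R).Nodup)
    (hpw : (P ++ R).Pairwise (fun a b => |a| ≤ |b|))
    (hmem : ∀ z : Int, z ∈ P ++ R ↔ arr.count z ≠ 0)
    (cnt : PySem.Dict Int Int)
    (hI : ∀ y : Int, cnt.getD y 0 = (arr.count y : Int) -
          (if (2:Int) ∣ y ∧ y / 2 ∈ P then pendA arr (y / 2) else 0)) :
    (R.foldl
      (fun s x =>
        if s.1 then s
        else if s.2.getD (2 * x) 0 < s.2.getD x 0 then (true, s.2)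
        else (false, s.2.modify (2 * x) 0 (fun t => t - s.2.getD x 0)))
      (false, cnt)).1
    = !decide (∀ x ∈ R, pendA arr x ≤ (arr.count (2 * x) : Int)) := by
  induction R generalizing P cnt with
  | nil => simp
  | cons x R ih =>
      -- x ∉ P, x ∉ R
      have hnd' := List.nodup_append.mp hnd
      have hndx : x ∉ P ∧ x ∉ R :=
        ⟨fun hxP => hnd'.2.2 x hxP x (by simp) rfl, (List.nodup_cons.mp hnd'.2.1).1⟩
      -- current cnt[x] is pendA x
      have hx_mem : arr.count x ≠ 0 := (hmem x).mp (by simp)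
      have hcx : cnt.getD x 0 = pendA arr x := by
        rw [hI x]
        conv_rhs => rw [pendA]
        by_cases hg : x ≠ 0 ∧ (2:Int) ∣ x ∧ arr.count (x / 2) ≠ 0
        · rw [dif_pos hg]
          have hx2P : x / 2 ∈ P := by
            have hin : x / 2 ∈ P ++ x :: R := (hmem _).mpr hg.2.2
            have hne : x / 2 ≠ x := by obtain ⟨h1, h2, _⟩ := hg; omega
            rcases List.mem_append.mp hin with h | h
            · exact h
            · rcases List.mem_cons.mp h with h | h
              · exact absurd h hne
              · -- x before x/2 in pairwise: |x| ≤ |x/2|, contradiction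
                exfalso
                have habs : |x| ≤ |x / 2| := by
                  have := List.pairwise_append.mp hpw
                  have hx_lt := (List.pairwise_cons.mp (this.2.1)).1
                  exact hx_lt _ h
                simp only [Int.abs_eq_natAbs] at habs
                obtain ⟨h1, h2, _⟩ := hg; omega
          rw [if_pos ⟨hg.2.1, hx2P⟩]
        · rw [dif_neg hg]
          have : ¬ ((2:Int) ∣ x ∧ x / 2 ∈ P) := by
            rintro ⟨hdvd, hP⟩
            by_cases hx0 : x = 0
            · subst hx0; simp at hP; exact hndx.1 hP
            · have : arr.count (x / 2) ≠ 0 := (hmem _).mp (by simp [hP])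
              exact hg ⟨hx0, hdvd, this⟩
          rw [if_neg this]; ring
      have hc2x : cnt.getD (2 * x) 0 = (arr.count (2 * x) : Int) := by
        rw [hI (2 * x)]
        have h2 : (2 * x) / 2 = x := by omega
        rw [h2]
        rw [if_neg (fun h => hndx.1 h.2)]; ring
      simp only [List.foldl_cons]
      rw [if_neg (by simp : ¬ (((false : Bool), cnt).1 = true))]
      by_cases hfail : cnt.getD (2 * x) 0 < cnt.getD x 0
      · rw [if_pos hfail, A_flag_absorb]
        have : ¬ (pendA arr x ≤ (arr.count (2 * x) : Int)) := by
          rw [← hcx, ← hc2x]; omega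
        simp [this]
      · rw [if_neg hfail]
        have hstep : pendA arr x ≤ (arr.count (2 * x) : Int) := by
          rw [← hcx, ← hc2x]; omega
        have hI' : ∀ y : Int, (cnt.modify (2 * x) 0 (fun t => t - cnt.getD x 0)).getD y 0
            = (arr.count y : Int) -
              (if (2:Int) ∣ y ∧ y / 2 ∈ P ++ [x] then pendA arr (y / 2) else 0) := by
          intro y
          rw [PySem.Dict.getD_modify]
          by_cases hy : y = 2 * x
          · subst hy
            rw [if_pos rfl, hc2x, hcx]
            have h2 : (2 * x) / 2 = x := by omega
            rw [if_pos ⟨⟨x, by ring⟩, by simp [h2]⟩, h2]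
          · rw [if_neg hy, hI y]
            congr 1
            by_cases hdvd : (2:Int) ∣ y
            · have : (y / 2 ∈ P ++ [x]) ↔ (y / 2 ∈ P) := by
                simp only [List.mem_append, List.mem_singleton]
                constructor
                · rintro (h | h)
                  · exact h
                  · exfalso; apply hy; obtain ⟨k, hk⟩ := hdvd; omega
                · exact fun h => Or.inl h
              simp [this]
            · simp [hdvd]
        have := ih (P ++ [x]) (by simpa using hnd) (by simpa using hpw)
          (fun z => by simpa using hmem z) _ hI'
        rw [this]
        simp [hstep]

lemma A_char (arr : List Int) : canReorderDoubled2 arr = true ↔ Acond arr := by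
  unfold canReorderDoubled2
  simp only [PySem.Dict.getD_counter,
    PySem.Int.mod_eq_emod_of_pos (by norm_num : (0:Int) < 2)]
  by_cases hpar : ((arr.count 0 : Int)) % 2 = 0
  · rw [if_neg (by simpa using hpar)]
    have hkeys : (PySem.Dict.counter arr).keys = PySem.Set.ofList arr :=
      PySem.Dict.keys_counter arr
    set R := PySem.List.sorted (PySem.Dict.counter arr).keys (fun x : Int => |x|) false with hR
    have hperm : R.Perm (PySem.Set.ofList arr) := by
      rw [hR, hkeys]; exact PySem.List.sorted_perm _ _ _
    have hmemR : ∀ z : Int, z ∈ R ↔ z ∈ arr := fun z => by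
      rw [List.Perm.mem_iff hperm, PySem.Set.mem_ofList]
    have hnd : ([] ++ R : List Int).Nodup := by
      simpa using hperm.nodup_iff.mpr (PySem.Set.nodup_ofList arr)
    have hpw : ([] ++ R : List Int).Pairwise (fun a b => |a| ≤ |b|) := by
      simpa [hR, hkeys] using PySem.List.sorted_pairwise (PySem.Set.ofList arr) (fun x : Int => |x|)
    have hmem : ∀ z : Int, z ∈ ([] ++ R : List Int) ↔ arr.count z ≠ 0 := by
      intro z
      rw [List.nil_append, hmemR z]
      simp [List.count_pos_iff.symm, Nat.pos_iff_ne_zero]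
    have hI : ∀ y : Int, (PySem.Dict.counter arr).getD y 0 = (arr.count y : Int) -
        (if (2:Int) ∣ y ∧ y / 2 ∈ ([] : List Int) then pendA arr (y / 2) else 0) := by
      intro y; simp [PySem.Dict.getD_counter]
    rw [A_loop arr [] R hnd hpw hmem _ hI]
    simp only [Bool.not_not, decide_eq_true_eq]
    constructor
    · exact fun h => ⟨hpar, fun x hx => h x ((hmemR x).mpr hx)⟩
    · exact fun h x hx => h.2 x ((hmemR x).mp hx)
  · rw [if_pos (by simpa using hpar)]
    simp only [Bool.false_eq_true, false_iff]
    exact fun h => hpar h.1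

lemma sorted2_abs_id_eq (xs : List Int) :
    PySem.List.sorted2 xs (fun v => |v|) (fun v => v) false
      = PySem.List.sorted xs keyL false := by
  rw [PySem.List.sorted2, PySem.List.sorted]
  congr 1
  funext acc x
  congr 1
  funext a b
  simp only [if_neg (by decide : ¬ (false = true))]
  rcases lt_trichotomy (|a| : Int) (|b| : Int) with h | h | h
  · simp [keyL, Prod.Lex.lt_iff, h, not_lt.mpr (le_of_lt h)]
  · simp [keyL, Prod.Lex.lt_iff, h]
  · simp [keyL, Prod.Lex.lt_iff, h, not_lt.mpr (le_of_lt h)]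
    omega

lemma values_all_zero_iff (d : PySem.Dict Int Int) (hnd : d.keys.Nodup) :
    (d.values.all (fun v => v == 0)) = true ↔ ∀ y : Int, d.getD y 0 = 0 := by
  rw [PySem.Dict.values_eq_map_keys d hnd 0]
  simp only [List.all_map, List.all_eq_true, Function.comp, beq_iff_eq]
  constructor
  · intro h y
    by_cases hy : y ∈ d.keys
    · exact h y hy
    · exact PySem.Dict.getD_of_not_contains d 0 (by
        by_contra hc
        exact hy ((PySem.Dict.contains_iff_mem_keys d y).mp (by simpa using hc)))
  · intro h y _; exact h y

lemma count_flatMap_replicate (K : List Int) (c : Int → Nat) (hnd : K.Nodup) (u : Int) :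
    ((K.flatMap (fun v => List.replicate (c v) v)).count u) = if u ∈ K then c u else 0 := by
  induction K with
  | nil => simp
  | cons v K ih =>
      rw [List.flatMap_cons, List.count_append,
        ih (List.nodup_cons.mp hnd).2]
      by_cases hu : u = v
      · subst hu
        simp [(List.nodup_cons.mp hnd).1]
      · simp only [List.count_replicate, List.mem_cons]
        rw [if_neg (by simpa using Ne.symm hu)]
        by_cases hK : u ∈ K
        · simp [hK, hu]
        · simp [hK, hu]

lemma pairwise_flatMap_replicate (K : List Int) (c : Int → Nat)
    (h : K.Pairwise (fun a b => keyL a < keyL b)) :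
    (K.flatMap (fun v => List.replicate (c v) v)).Pairwise (fun a b => keyL a ≤ keyL b) := by
  induction K with
  | nil => simp
  | cons v K ih =>
      rw [List.flatMap_cons, List.pairwise_append]
      refine ⟨List.pairwise_replicate.mpr (Or.inr le_rfl), ih (List.pairwise_cons.mp h).2, ?_⟩
      intro a ha b hb
      have hav : a = v := (List.eq_of_mem_replicate ha)
      obtain ⟨u, hu, hbu⟩ := List.mem_flatMap.mp hb
      have hbu' : b = u := List.eq_of_mem_replicate hbu
      rw [hav, hbu']
      exact le_of_lt ((List.pairwise_cons.mp h).1 u hu)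

lemma sorted_eq_flatMap (arr : List Int) :
    PySem.List.sorted arr keyL false
      = (KbL arr).flatMap (fun v => List.replicate (arr.count v) v) := by
  apply PySem.List.eq_of_perm_of_pairwise_le_of_injective keyL keyL_injective
  · refine ((PySem.List.sorted_perm arr keyL false).trans ?_)
    rw [List.perm_iff_count]
    intro a
    rw [count_flatMap_replicate _ _ (KbL_nodup arr)]
    by_cases ha : a ∈ KbL arr
    · rw [if_pos ha]
    · rw [if_neg ha]
      have := (KbL_mem arr a).not.mp ha
      simpa using this
  · exact PySem.List.sorted_pairwise arr keyL
  · exact pairwise_flatMap_replicate _ _ (KbL_pairwise arr)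

lemma B_keys_nodup (L : List Int) (d : PySem.Dict Int Int) (h : d.keys.Nodup) :
    ((L.foldl
      (fun w x => if w.getD x 0 > 0 then w.modify x 0 (fun t => t - 1)
                  else w.modify (2 * x) 0 (fun t => t + 1)) d).keys).Nodup := by
  induction L generalizing d with
  | nil => exact h
  | cons x L ih =>
      simp only [List.foldl_cons]
      split
      · exact ih _ (by rw [PySem.Dict.keys_modify]; exact PySem.Dict.nodup_keys_insert _ _ _ h)
      · exact ih _ (by rw [PySem.Dict.keys_modify]; exact PySem.Dict.nodup_keys_insert _ _ _ h)

lemma B_block_ne (v : Int) (hv : v ≠ 0) (n : Nat) (w : PySem.Dict Int Int)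
    (hp : 0 ≤ w.getD v 0) (y : Int) :
    (((List.replicate n v).foldl
      (fun w x => if w.getD x 0 > 0 then w.modify x 0 (fun t => t - 1)
                  else w.modify (2 * x) 0 (fun t => t + 1)) w).getD y 0)
    = if y = v then max 0 (w.getD v 0 - n)
      else if y = 2 * v then w.getD (2 * v) 0 + max 0 ((n : Int) - w.getD v 0)
      else w.getD y 0 := by
  induction n generalizing w with
  | zero =>
      simp only [List.replicate, List.foldl_nil, Nat.cast_zero]
      split_ifs with h1 h2
      · subst h1; omega
      · subst h2; omega
      · rfl
  | succ n ih =>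
      rw [List.replicate_succ, List.foldl_cons]
      have h2v : (2 : Int) * v ≠ v := by omega
      by_cases hgt : w.getD v 0 > 0
      · rw [if_pos hgt]
        have h1 : (w.modify v 0 (fun t => t - 1)).getD v 0 = w.getD v 0 - 1 :=
          PySem.Dict.getD_modify_self _ _ _ _
        have h2 : (w.modify v 0 (fun t => t - 1)).getD (2*v) 0 = w.getD (2*v) 0 := by
          rw [PySem.Dict.getD_modify, if_neg h2v]
        rw [ih _ (by rw [h1]; omega)]
        by_cases hy : y = v
        · subst hy; simp only [h1]; push_cast; omega
        · rw [if_neg hy, if_neg hy]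
          by_cases hy2 : y = 2*v
          · subst hy2; simp only [h2, h1]; push_cast; omega
          · rw [if_neg hy2, if_neg hy2, PySem.Dict.getD_modify, if_neg hy]
      · rw [if_neg hgt]
        have h1 : (w.modify (2*v) 0 (fun t => t + 1)).getD v 0 = w.getD v 0 := by
          rw [PySem.Dict.getD_modify, if_neg (fun h => h2v h.symm)]
        have h2 : (w.modify (2*v) 0 (fun t => t + 1)).getD (2*v) 0 = w.getD (2*v) 0 + 1 :=
          PySem.Dict.getD_modify_self _ _ _ _
        rw [ih _ (by rw [h1]; omega)]
        by_cases hy : y = v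
        · subst hy; simp only [h1]; push_cast; omega
        · rw [if_neg hy, if_neg hy]
          by_cases hy2 : y = 2*v
          · subst hy2; simp only [h2, h1]; push_cast; omega
          · rw [if_neg hy2, if_neg hy2, PySem.Dict.getD_modify, if_neg hy2]

lemma B_block_zero (n : Nat) (w : PySem.Dict Int Int)
    (hp : w.getD 0 0 = 0 ∨ w.getD 0 0 = 1) (y : Int) :
    (((List.replicate n (0:Int)).foldl
      (fun w x => if w.getD x 0 > 0 then w.modify x 0 (fun t => t - 1)
                  else w.modify (2 * x) 0 (fun t => t + 1)) w).getD y 0)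
    = if y = 0 then (w.getD 0 0 + n) % 2 else w.getD y 0 := by
  induction n generalizing w with
  | zero =>
      simp only [List.replicate, List.foldl_nil, Nat.cast_zero, add_zero]
      split_ifs with h1
      · subst h1; omega
      · rfl
  | succ n ih =>
      rw [List.replicate_succ, List.foldl_cons]
      have e0 : ((2:Int) * 0) = 0 := by ring
      by_cases hgt : w.getD 0 0 > 0
      · rw [if_pos hgt]
        have h1 : (w.modify 0 0 (fun t => t - 1)).getD 0 0 = w.getD 0 0 - 1 :=
          PySem.Dict.getD_modify_self _ _ _ _
        rw [ih _ (by rw [h1]; omega)]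
        by_cases hy : y = 0
        · subst hy; simp only [h1]; push_cast; omega
        · rw [if_neg hy, if_neg hy, PySem.Dict.getD_modify, if_neg hy]
      · rw [if_neg hgt, e0]
        have h1 : (w.modify 0 0 (fun t => t + 1)).getD 0 0 = w.getD 0 0 + 1 :=
          PySem.Dict.getD_modify_self _ _ _ _
        rw [ih _ (by rw [h1]; omega)]
        by_cases hy : y = 0
        · subst hy; simp only [h1]; push_cast; omega
        · rw [if_neg hy, if_neg hy, PySem.Dict.getD_modify, if_neg hy]

lemma wdesc_nonneg (arr P : List Int) (y : Int) : 0 ≤ wdesc arr P y := by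
  rw [wdesc]
  split_ifs with h1 h2
  · omega
  · simp
  · exact boutB_nonneg arr (y / 2)
  · rfl

lemma wdesc_snoc (arr P : List Int) (v y : Int) (hyv : y ≠ v) (hy2 : y ≠ 2 * v) :
    wdesc arr (P ++ [v]) y = wdesc arr P y := by
  rw [wdesc, wdesc]
  have hmem : (y ∈ P ++ [v]) ↔ y ∈ P := by simp [hyv]
  by_cases hyP : y ∈ P
  · rw [if_pos (hmem.mpr hyP), if_pos hyP]
  · rw [if_neg (fun h => hyP (hmem.mp h)), if_neg hyP]
    by_cases hg : y ≠ 0 ∧ (2:Int) ∣ y ∧ y / 2 ∈ P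
    · rw [if_pos hg, if_pos ⟨hg.1, hg.2.1, by simp [hg.2.2]⟩]
    · have : ¬ (y ≠ 0 ∧ (2:Int) ∣ y ∧ y / 2 ∈ P ++ [v]) := by
        rintro ⟨h1, h2, h3⟩
        rcases List.mem_append.mp h3 with h | h
        · exact hg ⟨h1, h2, h⟩
        · simp only [List.mem_singleton] at h
          apply hy2; obtain ⟨k, hk⟩ := h2; omega
      rw [if_neg this, if_neg hg]

lemma B_loop (arr : List Int) (P R : List Int)
    (hnd : (P ++ R).Nodup)
    (hpw : (P ++ R).Pairwise (fun a b => keyL a < keyL b))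
    (hmem : ∀ z : Int, z ∈ P ++ R ↔ arr.count z ≠ 0)
    (w : PySem.Dict Int Int)
    (hI : ∀ y : Int, w.getD y 0 = wdesc arr P y) (y : Int) :
    (((R.flatMap (fun v => List.replicate (arr.count v) v)).foldl
      (fun w x => if w.getD x 0 > 0 then w.modify x 0 (fun t => t - 1)
                  else w.modify (2 * x) 0 (fun t => t + 1)) w).getD y 0)
    = wdesc arr (P ++ R) y := by
  induction R generalizing P w y with
  | nil => simpa using hI y
  | cons v R ih =>
      have hnd' := List.nodup_append.mp hnd
      have hvP : v ∉ P := fun hvP => hnd'.2.2 v hvP v (by simp) rfl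
      have hvR : v ∉ R := (List.nodup_cons.mp hnd'.2.1).1
      have hvcnt : arr.count v ≠ 0 := (hmem v).mp (by simp)
      have hpw' := List.pairwise_append.mp hpw
      have hPv : ∀ z ∈ P, keyL z < keyL v := fun z hz => hpw'.2.2 z hz v (by simp)
      have hvR' : ∀ z ∈ R, keyL v < keyL z := (List.pairwise_cons.mp hpw'.2.1).1
      rw [List.flatMap_cons, List.foldl_append]
      by_cases hv : v = 0
      · subst hv
        have hp0 : w.getD 0 0 = 0 := by
          rw [hI 0, wdesc, if_neg hvP, if_neg (by rintro ⟨h, _⟩; exact h rfl)]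
        have hI' : ∀ z : Int, ((List.replicate (arr.count 0) (0:Int)).foldl
            (fun w x => if w.getD x 0 > 0 then w.modify x 0 (fun t => t - 1)
                        else w.modify (2 * x) 0 (fun t => t + 1)) w).getD z 0
            = wdesc arr (P ++ [0]) z := by
          intro z
          rw [B_block_zero _ _ (Or.inl hp0)]
          by_cases hz : z = 0
          · subst hz
            rw [if_pos rfl, hp0, wdesc, if_pos (by simp), if_pos rfl]
            push_cast; omega
          · rw [if_neg hz, hI z, wdesc_snoc arr P 0 z hz (by simpa using hz)]
        have := ih (P ++ [0]) (by simpa using hnd) (by simpa using hpw)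
          (fun z => by simpa using hmem z) _ hI' y
        rw [this]; simp
      · have hq : w.getD (2 * v) 0 = 0 := by
          rw [hI (2 * v), wdesc]
          have h2vP : 2 * v ∉ P := by
            intro h
            have := hPv _ h
            rw [keyL_lt_iff] at this
            simp only [Int.abs_eq_natAbs] at this
            omega
          rw [if_neg h2vP]
          have hvv : (2 * v) / 2 = v := by omega
          rw [if_neg (by rintro ⟨_, _, h3⟩; rw [hvv] at h3; exact hvP h3)]
        have hpv : w.getD v 0 = binB arr v := by
          rw [hI v, wdesc, if_neg hvP, binB]
          by_cases hg : v ≠ 0 ∧ (2:Int) ∣ v ∧ arr.count (v / 2) ≠ 0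
          · rw [if_pos hg]
            have hv2P : v / 2 ∈ P := by
              have hin : v / 2 ∈ P ++ v :: R := (hmem _).mpr hg.2.2
              have hne : v / 2 ≠ v := by obtain ⟨h1, h2, _⟩ := hg; omega
              rcases List.mem_append.mp hin with h | h
              · exact h
              · rcases List.mem_cons.mp h with h | h
                · exact absurd h hne
                · exfalso
                  have := hvR' _ h
                  rw [keyL_lt_iff] at this
                  simp only [Int.abs_eq_natAbs] at this
                  obtain ⟨h1, h2, _⟩ := hg
                  omega
            rw [if_pos ⟨hg.1, hg.2.1, hv2P⟩]
          · rw [if_neg hg]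
            rw [if_neg (by
              rintro ⟨h1, h2, h3⟩
              have : arr.count (v / 2) ≠ 0 := (hmem _).mp (by simp [h3])
              exact hg ⟨h1, h2, this⟩)]
        have hnn : 0 ≤ w.getD v 0 := by rw [hI v]; exact wdesc_nonneg arr P v
        have hI' : ∀ z : Int, ((List.replicate (arr.count v) v).foldl
            (fun w x => if w.getD x 0 > 0 then w.modify x 0 (fun t => t - 1)
                        else w.modify (2 * x) 0 (fun t => t + 1)) w).getD z 0
            = wdesc arr (P ++ [v]) z := by
          intro z
          rw [B_block_ne v hv _ _ hnn]
          by_cases hz : z = v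
          · subst hz
            rw [if_pos rfl, hpv, wdesc, if_pos (by simp), if_neg hv]
          · rw [if_neg hz]
            by_cases hz2 : z = 2 * v
            · subst hz2
              rw [if_pos rfl, hq, hpv, wdesc]
              have h2vv : 2 * v ≠ v := by omega
              have h2vP : 2 * v ∉ P := by
                intro h
                have := hPv _ h
                rw [keyL_lt_iff] at this
                simp only [Int.abs_eq_natAbs] at this
                omega
              rw [if_neg (by simp [h2vP, h2vv]), if_pos ⟨by omega, ⟨v, by ring⟩, by
                have : (2 * v) / 2 = v := by omega
                simp [this]⟩]
              have : (2 * v) / 2 = v := by omega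
              rw [this, boutB_eq]
              omega
            · rw [if_neg hz2, hI z, wdesc_snoc arr P v z hz hz2]
        have := ih (P ++ [v]) (by simpa using hnd) (by simpa using hpw)
          (fun z => by simpa using hmem z) _ hI' y
        rw [this]; simp

lemma bout_eq_pend_of_res (arr : List Int)
    (hres : ∀ x : Int, arr.count x ≠ 0 → x ≠ 0 → binB arr x ≤ (arr.count x : Int)) :
    ∀ n : Nat, ∀ x : Int, x.natAbs ≤ n → arr.count x ≠ 0 → x ≠ 0 →
      boutB arr x = pendA arr x := by
  intro n
  induction n with
  | zero => intro x hx _ hx0; omega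
  | succ n ih =>
      intro x hxn hxc hx0
      rw [boutB_eq, pendA_eq, binB]
      by_cases hg : x ≠ 0 ∧ (2:Int) ∣ x ∧ arr.count (x / 2) ≠ 0
      · rw [if_pos hg, if_pos hg]
        have hx2 : (x / 2) ≠ 0 := by obtain ⟨h1, h2, _⟩ := hg; omega
        have := ih (x / 2) (by obtain ⟨h1, h2, _⟩ := hg; omega) hg.2.2 hx2
        rw [← this]
        have hb : binB arr x ≤ (arr.count x : Int) := hres x hxc hx0
        rw [binB, if_pos hg] at hb
        omega
      · rw [if_neg hg, if_neg hg]
        have : (0:Int) ≤ (arr.count x : Int) := by positivity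
        omega

-- Acond → boutB coincides with pendA and residues vanish along the support

lemma bout_eq_pend_of_Acond (arr : List Int) (hA : Acond arr) :
    ∀ n : Nat, ∀ x : Int, x.natAbs ≤ n → arr.count x ≠ 0 → x ≠ 0 →
      boutB arr x = pendA arr x ∧ binB arr x ≤ (arr.count x : Int) := by
  intro n
  induction n with
  | zero => intro x hx _ hx0; omega
  | succ n ih =>
      intro x hxn hxc hx0
      by_cases hg : x ≠ 0 ∧ (2:Int) ∣ x ∧ arr.count (x / 2) ≠ 0
      · have hx2 : (x / 2) ≠ 0 := by obtain ⟨h1, h2, _⟩ := hg; omega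
        have hih := ih (x / 2) (by obtain ⟨h1, h2, _⟩ := hg; omega) hg.2.2 hx2
        have hmem : x / 2 ∈ arr := by
          rw [← List.count_pos_iff]; omega
        have hAx : pendA arr (x / 2) ≤ (arr.count (2 * (x / 2)) : Int) := hA.2 _ hmem
        have hx22 : 2 * (x / 2) = x := by obtain ⟨h1, h2, _⟩ := hg; omega
        rw [hx22] at hAx
        have hbin : binB arr x ≤ (arr.count x : Int) := by
          rw [binB, if_pos hg, hih.1]; exact hAx
        refine ⟨?_, hbin⟩
        rw [boutB_eq, pendA_eq, if_pos hg]
        have : binB arr x = pendA arr (x / 2) := by rw [binB, if_pos hg, hih.1]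
        omega
      · have hbin : binB arr x = 0 := by rw [binB, if_neg hg]
        refine ⟨?_, by rw [hbin]; positivity⟩
        rw [boutB_eq, pendA_eq, if_neg hg, hbin]
        have : (0:Int) ≤ (arr.count x : Int) := by positivity
        omega

lemma wdesc_zero_iff_Acond (arr : List Int) :
    (∀ y : Int, wdesc arr (KbL arr) y = 0) ↔ Acond arr := by
  constructor
  · intro hz
    have hres : ∀ x : Int, arr.count x ≠ 0 → x ≠ 0 → binB arr x ≤ (arr.count x : Int) := by
      intro x hxc hx0
      have := hz x
      rw [wdesc, if_pos ((KbL_mem arr x).mpr hxc), if_neg hx0] at this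
      omega
    have hE := bout_eq_pend_of_res arr hres
    constructor
    · by_cases h0 : arr.count 0 = 0
      · simp [h0]
      · have := hz 0
        rw [wdesc, if_pos ((KbL_mem arr 0).mpr h0), if_pos rfl] at this
        exact this
    · intro x hx
      have hxc : arr.count x ≠ 0 := by
        simpa [Nat.pos_iff_ne_zero] using List.count_pos_iff.mpr hx
      by_cases hx0 : x = 0
      · subst hx0
        rw [pendA_eq, if_neg (by rintro ⟨h, _⟩; exact h rfl)]
        norm_num
      · rw [← hE x.natAbs x le_rfl hxc hx0]
        by_cases h2x : arr.count (2 * x) = 0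
        · have := hz (2 * x)
          rw [wdesc, if_neg (fun h => (KbL_mem arr (2*x)).mp h (by simpa using h2x))] at this
          have hvv : (2 * x) / 2 = x := by omega
          rw [if_pos ⟨by omega, ⟨x, by ring⟩, by rw [hvv]; exact (KbL_mem arr x).mpr hxc⟩,
            hvv] at this
          rw [this, h2x]; norm_num
        · have := hres (2 * x) h2x (by omega)
          rw [binB, if_pos ⟨by omega, ⟨x, by ring⟩, by
            have hvv : (2 * x) / 2 = x := by omega
            rw [hvv]; exact hxc⟩] at this
          have hvv : (2 * x) / 2 = x := by omega
          rw [hvv] at this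
          exact this
  · intro hA y
    have hF := bout_eq_pend_of_Acond arr hA
    rw [wdesc]
    by_cases hyK : y ∈ KbL arr
    · rw [if_pos hyK]
      have hyc : arr.count y ≠ 0 := (KbL_mem arr y).mp hyK
      by_cases hy0 : y = 0
      · subst hy0; rw [if_pos rfl]; exact hA.1
      · rw [if_neg hy0]
        have := (hF y.natAbs y le_rfl hyc hy0).2
        omega
    · rw [if_neg hyK]
      by_cases hg : y ≠ 0 ∧ (2:Int) ∣ y ∧ y / 2 ∈ KbL arr
      · rw [if_pos hg]
        have hy2c : arr.count (y / 2) ≠ 0 := (KbL_mem arr _).mp hg.2.2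
        have hy20 : y / 2 ≠ 0 := by obtain ⟨h1, h2, _⟩ := hg; omega
        have := (hF (y/2).natAbs (y/2) le_rfl hy2c hy20).1
        rw [this]
        have hmem : y / 2 ∈ arr := by rw [← List.count_pos_iff]; omega
        have hAx := hA.2 _ hmem
        have hyy : 2 * (y / 2) = y := by obtain ⟨h1, h2, _⟩ := hg; omega
        rw [hyy] at hAx
        have hyc : arr.count y = 0 := by
          by_contra hc
          exact hyK ((KbL_mem arr y).mpr hc)
        have hnn : 0 ≤ pendA arr (y / 2) := by
          rw [← this]; exact boutB_nonneg arr (y / 2)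
        omega
      · rw [if_neg hg]

lemma B_char (arr : List Int) :
    canReorderDoubled2_alt arr = true ↔ ∀ y : Int, wdesc arr (KbL arr) y = 0 := by
  show ((((PySem.List.sorted2 arr (fun v => |v|) (fun v => v) false).foldl
      (fun w x => if w.getD x 0 > 0 then w.modify x 0 (fun t => t - 1)
                  else w.modify (2 * x) 0 (fun t => t + 1))
      (PySem.Dict.empty : PySem.Dict Int Int)).values.all (fun v => v == 0)) = true) ↔ _
  rw [sorted2_abs_id_eq, sorted_eq_flatMap]
  refine (values_all_zero_iff _ (B_keys_nodup ((KbL arr).flatMap (fun v => List.replicate (arr.count v) v))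
    PySem.Dict.empty PySem.Dict.nodup_keys_empty)).trans ?_
  have hloop := B_loop arr [] (KbL arr) (by simpa using KbL_nodup arr)
    (by simpa using KbL_pairwise arr) (fun z => by simpa using KbL_mem arr z)
    PySem.Dict.empty (fun y => by
      rw [PySem.Dict.getD_empty, wdesc]
      simp)
  constructor
  · intro h y
    have := h y
    rw [hloop y] at this
    simpa using this
  · intro h y
    rw [hloop y]
    simpa using h y

-- ===== VERDICT (by name: the statement is the Claim_ definition above) =====
theorem canReorderDoubled2_spec : Claim_equal_canReorderDoubled2 := by
  intro arr _
  unfold Spec_canReorderDoubled2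
  rw [Bool.eq_iff_iff, A_char, B_char, wdesc_zero_iff_Acond]
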